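-- pv_equiv track=rewrite | github.com/kszenes/moltui | src/moltui/parsers.py | _clean_cif_lines
-- ===== SOURCE A (Python) =====
-- def _clean_cif_lines(raw_lines: list[str]) -> list[str]:
--     """Strip comments and collapse ``;``-delimited multi-line text fields.
--
--     A multi-line text block opens with a line starting with ``;`` (column 1)
--     and closes with the next such line. The whole block represents a single
--     CIF value, so we collapse it to one double-quoted token appended to the
--     preceding output line (or emitted alone if no preceding line exists).
--     """
--     lines: list[str] = []
--     in_semi = False
--     semi_buf: list[str] = []
--     for raw in raw_lines:
--         line = raw.rstrip("\r\n")
--         if in_semi: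
--             if line.startswith(";"):
--                 content = " ".join(s.strip() for s in semi_buf if s.strip())
--                 token = '"' + content.replace('"', "'") + '"'
--                 if lines:
--                     lines[-1] = lines[-1] + " " + token
--                 else:
--                     lines.append(token)
--                 in_semi = False
--                 semi_buf = []
--             else:
--                 semi_buf.append(line)
--             continue
--         if line.startswith(";"):
--             in_semi = True
--             rest = line[1:]
--             if rest.strip():
--                 semi_buf.append(rest)
--             continue
--         stripped = line.split("#", 1)[0].rstrip()
--         if stripped.strip():
--             lines.append(stripped)
--     return lines
-- ===== SOURCE B (Python) =====
-- def _clean_cif_lines(raw_lines: list[str]) -> list[str]: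
--     """Strip comments and collapse ;-delimited multi-line blocks (block-structured rewrite)."""
--     lines: list[str] = []
--     i = 0
--     n = len(raw_lines)
--     while i < n:
--         line = raw_lines[i].rstrip("\r\n")
--         if line.startswith(";"):
--             rest = line[1:]
--             buf = [rest] if rest.strip() else []
--             j = i + 1
--             closed = False
--             while j < n:
--                 l2 = raw_lines[j].rstrip("\r\n")
--                 if l2.startswith(";"):
--                     closed = True
--                     break
--                 buf.append(l2)
--                 j += 1
--             if not closed:
--                 # unterminated block: nothing more is emitted
--                 return lines
--             content = " ".join(s.strip() for s in buf if s.strip())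
--             token = '"' + content.replace('"', "'") + '"'
--             if lines:
--                 lines[-1] = lines[-1] + " " + token
--             else:
--                 lines.append(token)
--             i = j + 1
--         else:
--             stripped = line.split("#", 1)[0].rstrip()
--             if stripped.strip():
--                 lines.append(stripped)
--             i += 1
--     return lines
-- ===== Notes on version B (the rewrite author's own statement) =====
-- stated objective: alternative
-- what changed: The in_semi flag state machine over single lines is replaced by a block-structured index loop: each ';' opener triggers an inner scan that collects the whole multi-line block (or returns early if unterminated) before emitting its token.
import Mathlib
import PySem

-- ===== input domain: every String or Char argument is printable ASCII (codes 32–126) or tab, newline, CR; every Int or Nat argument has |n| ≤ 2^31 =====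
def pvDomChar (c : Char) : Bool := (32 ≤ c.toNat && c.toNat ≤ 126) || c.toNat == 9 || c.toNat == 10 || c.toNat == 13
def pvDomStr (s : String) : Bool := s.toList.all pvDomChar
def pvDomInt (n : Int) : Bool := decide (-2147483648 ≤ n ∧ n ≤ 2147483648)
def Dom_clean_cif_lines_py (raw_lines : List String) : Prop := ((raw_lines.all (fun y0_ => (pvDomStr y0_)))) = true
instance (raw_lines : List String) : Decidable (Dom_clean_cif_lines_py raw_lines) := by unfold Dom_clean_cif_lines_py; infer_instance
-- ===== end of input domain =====

-- B replaces A's in_semi flag state machine by a block-structured loop with an inner scan per ';' block (objective: alternative decomposition, same cost).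

-- shared primitive: exact hand port of str.rstrip("\r\n") (PySem has no rstrip-with-chars)
def pvRstripCRLF (s : String) : String :=
  String.ofList ((s.toList.reverse.dropWhile (fun c => c == '\r' || c == '\n')).reverse)

-- token built from a semicolon block's buffered lines:  '"' + " ".join(s.strip() for s in buf if s.strip()).replace('"',"'") + '"'
def pvSemiToken (semi_buf : List String) : String :=
  let content := PySem.Str.join " "
    (semi_buf.filterMap (fun s => let t := PySem.Str.strip s; if t = "" then none else some t))
  PySem.Str.join "" ["\"", PySem.Str.replace content "\"" "'", "\""]

-- lines[-1] = lines[-1] + " " + token  /  lines.append(token) if empty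
def pvAppendToken (lines : List String) (token : String) : List String :=
  match lines with
  | [] => [token]
  | _ :: _ => lines.dropLast ++ [PySem.Str.join " " [lines.getLast!, token]]

-- line.split("#", 1)[0].rstrip()
def pvStripComment (line : String) : String :=
  PySem.Str.rstrip (((PySem.Str.splitMax? line "#" 1).getD []).headD "")

-- ===== PORT A =====
-- A's loop body: state (lines, in_semi, semi_buf)
def pvStepA (st : List String × Bool × List String) (raw : String) : List String × Bool × List String :=
  let line := pvRstripCRLF raw
  match st with
  | (lines, true, semi_buf) =>        -- if in_semi:
    if PySem.Str.startswith line ";" then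
      (pvAppendToken lines (pvSemiToken semi_buf), false, [])
    else
      (lines, true, semi_buf ++ [line])
  | (lines, false, semi_buf) =>
    if PySem.Str.startswith line ";" then
      let rest := PySem.Str.slice line (some 1) none
      (lines, true, if PySem.Str.strip rest ≠ "" then semi_buf ++ [rest] else semi_buf)
    else
      let stripped := pvStripComment line
      (if PySem.Str.strip stripped ≠ "" then lines ++ [stripped] else lines, false, semi_buf)

def clean_cif_lines_py (raw_lines : List String) : List String :=
  (raw_lines.foldl pvStepA ([], false, [])).1

-- ===== PORT B =====
-- inner scan: collect non-';' lines into buf until a closing ';' line; none = unterminated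
def pvCollect : List String → List String → Option (List String × List String)
  | [], _ => none
  | raw :: rest, buf =>
    let line := pvRstripCRLF raw
    if PySem.Str.startswith line ";" then some (buf, rest)
    else pvCollect rest (buf ++ [line])

theorem pvCollect_length : ∀ (l buf buf' rest' : List String),
    pvCollect l buf = some (buf', rest') → rest'.length < l.length := by
  intro l
  induction l with
  | nil => intro buf buf' rest' h; simp [pvCollect] at h
  | cons raw rest ih =>
    intro buf buf' rest' h
    simp only [pvCollect] at h
    split at h
    · cases h; simp
    · exact Nat.lt_succ_of_lt (ih _ _ _ h)

def pvGoB (acc : List String) (l : List String) : List String :=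
  match l with
  | [] => acc
  | raw :: rest =>
    let line := pvRstripCRLF raw
    if PySem.Str.startswith line ";" then
      let r0 := PySem.Str.slice line (some 1) none
      let buf0 := if PySem.Str.strip r0 ≠ "" then [r0] else []
      match h : pvCollect rest buf0 with
      | none => acc
      | some (buf, rest') => pvGoB (pvAppendToken acc (pvSemiToken buf)) rest'
    else
      let stripped := pvStripComment line
      pvGoB (if PySem.Str.strip stripped ≠ "" then acc ++ [stripped] else acc) rest
termination_by l.length
decreasing_by
  · exact Nat.lt_succ_of_lt (pvCollect_length _ _ _ _ h)
  · simp

def clean_cif_lines_py_alt (raw_lines : List String) : List String :=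
  pvGoB [] raw_lines

-- ===== PRECONDITION & SPEC =====
def Spec_clean_cif_lines_py (raw_lines : List String) (out : List String) : Prop := out = clean_cif_lines_py_alt raw_lines
instance (raw_lines : List String) (out : List String) : Decidable (Spec_clean_cif_lines_py raw_lines out) := by unfold Spec_clean_cif_lines_py; infer_instance

-- ===== CLAIM (what is proved, stated in full; the proofs are below) =====
def Claim_equal_clean_cif_lines_py : Prop := ∀ (raw_lines : List String), Dom_clean_cif_lines_py raw_lines → Spec_clean_cif_lines_py raw_lines (clean_cif_lines_py raw_lines)

-- ===== LEMMAS AND PROOFS =====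

-- A's fold from the in_semi state equals: scan to the closing ';' line (pvCollect), emit, continue
theorem foldA_semi : ∀ (l lines buf : List String),
    l.foldl pvStepA (lines, true, buf) =
      match pvCollect l buf with
      | none => (lines, true, buf ++ l.map pvRstripCRLF)
      | some (buf', rest') => rest'.foldl pvStepA (pvAppendToken lines (pvSemiToken buf'), false, []) := by
  intro l
  induction l with
  | nil => intro lines buf; simp [pvCollect]
  | cons raw rest ih =>
    intro lines buf
    simp only [List.foldl_cons, pvCollect, pvStepA]
    by_cases hs : PySem.Str.startswith (pvRstripCRLF raw) ";" = true
    · rw [if_pos hs, if_pos hs]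
    · rw [if_neg hs, if_neg hs, ih]
      cases hc : pvCollect rest (buf ++ [pvRstripCRLF raw]) with
      | none => simp
      | some p => rfl

theorem foldA_eq_goB : ∀ (l acc : List String),
    (l.foldl pvStepA (acc, false, [])).1 = pvGoB acc l := by
  intro l
  induction hn : l.length using Nat.strong_induction_on generalizing l with
  | _ n ih =>
    cases l with
    | nil => intro acc; simp [pvGoB]
    | cons raw rest =>
      intro acc
      have hlen : rest.length + 1 = n := by simpa using hn
      rw [pvGoB]
      simp only [List.foldl_cons, pvStepA]
      by_cases hs : PySem.Str.startswith (pvRstripCRLF raw) ";" = true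
      · rw [if_pos hs, if_pos hs]
        rw [foldA_semi, List.nil_append]
        cases hc : pvCollect rest
            (if PySem.Str.strip (PySem.Str.slice (pvRstripCRLF raw) (some 1) none) ≠ "" then
              [PySem.Str.slice (pvRstripCRLF raw) (some 1) none] else []) with
        | none => rfl
        | some p =>
          obtain ⟨buf', rest'⟩ := p
          have hlt : rest'.length < n := by
            have := pvCollect_length _ _ _ _ hc
            omega
          exact ih rest'.length hlt rest' rfl _
      · rw [if_neg hs, if_neg hs]
        exact ih rest.length (by omega) rest rfl _

-- ===== VERDICT (by name: the statement is the Claim_ definition above) =====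
theorem clean_cif_lines_py_spec : Claim_equal_clean_cif_lines_py := by
  intro raw_lines _
  unfold Spec_clean_cif_lines_py clean_cif_lines_py clean_cif_lines_py_alt
  exact foldA_eq_goB raw_lines []
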